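-- pv_equiv track=rewrite | github.com/supervisely-ecosystem/train-mmdetection-v3 | src/test.py | find_index_for_aug
-- ===== SOURCE A (Python) =====
-- def find_index_for_aug(pipeline):
--     # return index after LoadImageFromFile and LoadAnnotations
--     i1, i2 = -1, -1
--     types = [p["type"] for p in pipeline]
--     if "LoadImageFromFile" in types:
--         i1 = types.index("LoadImageFromFile")
--     if "LoadAnnotations" in types:
--         i2 = types.index("LoadAnnotations")
--     idx_insert = max(i1, i2)
--     if idx_insert != -1:
--         idx_insert += 1
--     return idx_insert
-- ===== SOURCE B (Python) =====
-- def find_index_for_aug(pipeline):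
--     # insert right after the earliest prefix that already contains every
--     # load op present anywhere in the pipeline (set-coverage scan)
--     LOAD_OPS = ("LoadImageFromFile", "LoadAnnotations")
--     needed = {p["type"] for p in pipeline if p["type"] in LOAD_OPS}
--     if not needed:
--         return -1
--     seen = set()
--     for i, p in enumerate(pipeline):
--         t = p["type"]
--         if t in needed:
--             seen.add(t)
--             if seen == needed:
--                 return i + 1
-- ===== Notes on version B (the rewrite author's own statement) =====
-- stated objective: alternative
-- what changed: Instead of computing each load op's first index and taking max+1, B first collects the set of load-op types present and then scans for the earliest prefix whose seen-set covers it, returning that position + 1 (early exit).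
import Mathlib
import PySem

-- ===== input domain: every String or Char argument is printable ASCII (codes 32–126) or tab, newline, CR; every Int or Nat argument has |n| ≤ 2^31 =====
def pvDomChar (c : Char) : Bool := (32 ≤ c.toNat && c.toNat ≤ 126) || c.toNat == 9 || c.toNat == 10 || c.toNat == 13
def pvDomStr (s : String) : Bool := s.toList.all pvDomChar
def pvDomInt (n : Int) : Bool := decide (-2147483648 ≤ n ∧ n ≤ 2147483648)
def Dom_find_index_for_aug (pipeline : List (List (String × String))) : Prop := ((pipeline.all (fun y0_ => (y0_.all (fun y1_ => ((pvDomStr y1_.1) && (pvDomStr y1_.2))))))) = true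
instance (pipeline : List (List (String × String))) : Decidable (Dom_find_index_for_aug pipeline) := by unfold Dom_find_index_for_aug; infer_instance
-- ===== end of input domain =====

-- B uses a different strategy: it collects the SET of load-op types present, then scans for the
-- earliest prefix whose seen-set covers that set and inserts right after it (objective: alternative).

-- p["type"] (first match in the association list; Pre_ guarantees the key exists)
def pvGetType (p : List (String × String)) : String := (List.lookup "type" p).getD ""

-- ===== PORT A =====
def find_index_for_aug (pipeline : List (List (String × String))) : Int :=
  let types := pipeline.map pvGetType
  let i1 : Int := if "LoadImageFromFile" ∈ types then (((PySem.List.index? types "LoadImageFromFile").getD 0 : Nat) : Int) else -1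
  let i2 : Int := if "LoadAnnotations" ∈ types then (((PySem.List.index? types "LoadAnnotations").getD 0 : Nat) : Int) else -1
  let idx_insert := max i1 i2
  if idx_insert ≠ -1 then idx_insert + 1 else idx_insert

-- ===== PORT B =====
def pvLoadOps : List String := ["LoadImageFromFile", "LoadAnnotations"]

-- the 'for i, p in enumerate(pipeline): …' coverage loop of Source B
def pvScan (needed : PySem.Set String) : List (Int × List (String × String)) → PySem.Set String → Int
  | [], _ => -1   -- unreachable in Source B: when needed ≠ ∅ the loop always returns
  | (i, p) :: rest, seen =>
      let t := pvGetType p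
      if PySem.Set.contains needed t then
        let seen' := PySem.Set.add seen t
        if PySem.Set.equal seen' needed then i + 1 else pvScan needed rest seen'
      else pvScan needed rest seen

def find_index_for_aug_alt (pipeline : List (List (String × String))) : Int :=
  let needed : PySem.Set String :=
    PySem.Set.ofList ((pipeline.map pvGetType).filter (fun t => decide (t ∈ pvLoadOps)))
  if needed = [] then -1
  else pvScan needed (PySem.List.enumerate pipeline) PySem.Set.empty

-- ===== PRECONDITION & SPEC =====
-- Pre_ excludes pipelines with an element lacking a "type" key, on which the Python A raises KeyError.
def Pre_find_index_for_aug (pipeline : List (List (String × String))) : Prop :=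
  ∀ p ∈ pipeline, (List.lookup "type" p).isSome = true
instance (pipeline : List (List (String × String))) : Decidable (Pre_find_index_for_aug pipeline) := by unfold Pre_find_index_for_aug; infer_instance
def pvWitness_find_index_for_aug : (List (List (String × String))) :=
  [[("type", "LoadImageFromFile")], [("type", "Resize")], [("type", "LoadAnnotations")]]

def Spec_find_index_for_aug (pipeline : List (List (String × String))) (out : Int) : Prop := out = find_index_for_aug_alt pipeline
instance (pipeline : List (List (String × String))) (out : Int) : Decidable (Spec_find_index_for_aug pipeline out) := by unfold Spec_find_index_for_aug; infer_instance

-- ===== CLAIM (what is proved, stated in full; the proofs are below) =====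
def Claim_equal_find_index_for_aug : Prop := ∀ (pipeline : List (List (String × String))), Dom_find_index_for_aug pipeline → Pre_find_index_for_aug pipeline → Spec_find_index_for_aug pipeline (find_index_for_aug pipeline)

-- ===== LEMMAS AND PROOFS =====

-- max of a list of Nats (0 if empty)
def pvM (ns : List Nat) : Nat := ns.foldr max 0

theorem pvM_shift (ms : List String) (g : String → Nat) (h : ms ≠ []) :
    pvM (ms.map (fun x => g x + 1)) = pvM (ms.map g) + 1 := by
  induction ms with
  | nil => exact absurd rfl h
  | cons a ms ih =>
    cases ms with
    | nil => simp [pvM]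
    | cons b ms' =>
      simp only [List.map_cons, pvM, List.foldr_cons] at *
      rw [ih (by simp)]
      omega

theorem pvM_erase (ms : List String) (t : String) (f g : String → Nat)
    (hnd : ms.Nodup) (ht : t ∈ ms) (hw : ∃ x ∈ ms, x ≠ t)
    (hf : ∀ x ∈ ms, f x = if x = t then 0 else g x + 1) :
    pvM (ms.map f) = pvM ((ms.erase t).map g) + 1 := by
  induction ms with
  | nil => cases ht
  | cons a ms ih =>
    by_cases ha : a = t
    · subst ha
      have herase : (a :: ms).erase a = ms := by simp
      rw [herase]
      have hfa : f a = 0 := by rw [hf a (by simp)]; simp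
      have hne : ms ≠ [] := by
        rcases hw with ⟨x, hx, hxt⟩
        intro h
        rw [h] at hx
        simp at hx
        exact hxt hx
      have hmap : ms.map f = ms.map (fun x => g x + 1) := by
        apply List.map_congr_left
        intro x hx
        have hxa : x ≠ a := fun hxe => (List.nodup_cons.mp hnd).1 (hxe ▸ hx)
        rw [hf x (by simp [hx])]
        simp [hxa]
      have hsh := pvM_shift ms g hne
      simp only [List.map_cons, pvM, List.foldr_cons] at *
      rw [hfa, hmap, hsh]
      omega
    · have ht' : t ∈ ms := by
        rcases List.mem_cons.mp ht with h | h
        · exact absurd h.symm ha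
        · exact h
      have herase : (a :: ms).erase t = a :: ms.erase t :=
        List.erase_cons_tail (by simpa using ha)
      have hfa : f a = g a + 1 := by rw [hf a (by simp)]; simp [ha]
      by_cases hw' : ∃ x ∈ ms, x ≠ t
      · have ihr := ih (List.nodup_cons.mp hnd).2 ht' hw' (fun x hx => hf x (by simp [hx]))
        rw [herase]
        simp only [List.map_cons, pvM, List.foldr_cons] at *
        rw [hfa, ihr]
        omega
      · push_neg at hw'
        have hms : ms = [t] := by
          cases ms with
          | nil => cases ht'
          | cons b ms' =>
            have hb := hw' b (by simp)
            subst hb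
            cases ms' with
            | nil => rfl
            | cons c ms'' =>
              have hc := hw' c (by simp)
              exact absurd (hc ▸ (List.nodup_cons.mp (List.nodup_cons.mp hnd).2).1) (by simp)
        subst hms
        have hft : f t = 0 := by rw [hf t (by simp)]; simp
        rw [herase]
        simp [pvM, hfa, hft, List.erase_cons_head]

theorem pvScan_spec (l : List (List (String × String))) :
    ∀ (n : Int) (seen : PySem.Set String) (ms : List String) (needed : PySem.Set String),
    seen.Nodup → ms.Nodup → ms ≠ [] →
    (∀ x ∈ ms, x ∉ seen) →
    (∀ x, x ∈ needed ↔ x ∈ seen ∨ x ∈ ms) →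
    (∀ x ∈ ms, x ∈ l.map pvGetType) →
    pvScan needed (PySem.List.enumerate l n) seen
      = n + ((pvM (ms.map (fun x => (PySem.List.index? (l.map pvGetType) x).getD 0)) : Nat) : Int) + 1 := by
  induction l with
  | nil =>
    intro n seen ms needed _ _ hne _ _ hall
    rcases List.exists_mem_of_ne_nil ms hne with ⟨x, hx⟩
    simpa using hall x hx
  | cons p l ih =>
    intro n seen ms needed hsnd hmnd hne hdisj hmem hall
    rw [PySem.List.enumerate_cons]
    by_cases hts : pvGetType p ∈ seen
    · -- head type already seen: add is a no-op, cover not complete yet, recurse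
      have htn : PySem.Set.contains needed (pvGetType p) = true :=
        (PySem.Set.contains_iff _ _).mpr ((hmem _).mpr (Or.inl hts))
      have hadd : PySem.Set.add seen (pvGetType p) = seen := by
        unfold PySem.Set.add
        rw [if_pos ((PySem.Set.contains_iff _ _).mpr hts)]
      rcases List.exists_mem_of_ne_nil ms hne with ⟨w, hw⟩
      have hneq : PySem.Set.equal seen needed = false := by
        rw [Bool.eq_false_iff]
        intro heq
        exact hdisj w hw (((PySem.Set.equal_iff _ _).mp heq w).mpr ((hmem w).mpr (Or.inr hw)))
      simp only [pvScan, htn, hadd, hneq, if_true, Bool.false_eq_true, if_false]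
      have hxt : ∀ x ∈ ms, x ≠ pvGetType p := fun x hx hxe => hdisj x hx (hxe ▸ hts)
      have hall' : ∀ x ∈ ms, x ∈ l.map pvGetType := by
        intro x hx
        rcases (by simpa using hall x hx : x = pvGetType p ∨ x ∈ l.map pvGetType) with h | h
        · exact absurd h (hxt x hx)
        · exact h
      rw [ih (n + 1) seen ms needed hsnd hmnd hne hdisj hmem hall']
      have hmapeq : ms.map (fun x => (PySem.List.index? ((p :: l).map pvGetType) x).getD 0)
          = ms.map (fun x => ((PySem.List.index? (l.map pvGetType) x).getD 0) + 1) := by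
        apply List.map_congr_left
        intro x hx
        rw [List.map_cons, PySem.List.index?_cons_of_ne _ (fun h => hxt x hx h.symm)]
        have hsome := (PySem.List.index?_isSome_iff (xs := l.map pvGetType) (v := x)).mpr (hall' x hx)
        cases hk : PySem.List.index? (l.map pvGetType) x with
        | none => rw [hk] at hsome; simp at hsome
        | some k => simp
      rw [hmapeq, pvM_shift ms _ hne]
      push_cast; ring
    · by_cases htm : pvGetType p ∈ ms
      · -- head type newly covered
        have htn : PySem.Set.contains needed (pvGetType p) = true :=
          (PySem.Set.contains_iff _ _).mpr ((hmem _).mpr (Or.inr htm))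
        by_cases hall_t : ∀ x ∈ ms, x = pvGetType p
        · -- ms = [pvGetType p]: coverage becomes complete, return here
          have hms : ms = [pvGetType p] := by
            cases ms with
            | nil => exact absurd rfl hne
            | cons a ms' =>
              have ha := hall_t a (by simp)
              subst ha
              cases ms' with
              | nil => rfl
              | cons b ms'' =>
                have hb := hall_t b (by simp)
                exact absurd (hb ▸ (List.nodup_cons.mp hmnd).1) (by simp)
          have heq : PySem.Set.equal (PySem.Set.add seen (pvGetType p)) needed = true := by
            rw [PySem.Set.equal_iff]
            intro x
            rw [PySem.Set.mem_add, hmem x, hms]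
            simp [or_comm]
          simp only [pvScan, htn, heq, if_true]
          rw [hms]
          simp only [List.map_cons, List.map_nil]
          rw [PySem.List.index?_cons_self]
          simp [pvM]
        · -- cover not yet complete: recurse with seen ∪ {t}, ms.erase t
          push_neg at hall_t
          rcases hall_t with ⟨w, hw, hwt⟩
          have heq : PySem.Set.equal (PySem.Set.add seen (pvGetType p)) needed = false := by
            rw [Bool.eq_false_iff]
            intro heq
            have hmm := ((PySem.Set.equal_iff _ _).mp heq w).mpr ((hmem w).mpr (Or.inr hw))
            rw [PySem.Set.mem_add] at hmm
            rcases hmm with h | h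
            · exact hdisj w hw h
            · exact hwt h
          simp only [pvScan, htn, heq, if_true, Bool.false_eq_true, if_false]
          have hemem : ∀ x, x ∈ ms.erase (pvGetType p) ↔ x ≠ pvGetType p ∧ x ∈ ms :=
            fun x => List.Nodup.mem_erase_iff hmnd
          have h1 : (PySem.Set.add seen (pvGetType p)).Nodup := PySem.Set.nodup_add seen _ hsnd
          have h2 : (ms.erase (pvGetType p)).Nodup := List.Nodup.erase _ hmnd
          have h3 : ms.erase (pvGetType p) ≠ [] := by
            intro h
            have := (hemem w).mpr ⟨hwt, hw⟩
            rw [h] at this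
            simp at this
          have h4 : ∀ x ∈ ms.erase (pvGetType p), x ∉ PySem.Set.add seen (pvGetType p) := by
            intro x hx hxs
            rcases (hemem x).mp hx with ⟨hxt, hxm⟩
            rw [PySem.Set.mem_add] at hxs
            rcases hxs with h | h
            · exact hdisj x hxm h
            · exact hxt h
          have h5 : ∀ x, x ∈ needed ↔ x ∈ PySem.Set.add seen (pvGetType p) ∨ x ∈ ms.erase (pvGetType p) := by
            intro x
            rw [hmem x, PySem.Set.mem_add, hemem x]
            constructor
            · rintro (h | h)
              · exact Or.inl (Or.inl h)
              · by_cases hxt : x = pvGetType p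
                · exact Or.inl (Or.inr hxt)
                · exact Or.inr ⟨hxt, h⟩
            · rintro ((h | h) | ⟨_, h⟩)
              · exact Or.inl h
              · exact Or.inr (h ▸ htm)
              · exact Or.inr h
          have h6 : ∀ x ∈ ms.erase (pvGetType p), x ∈ l.map pvGetType := by
            intro x hx
            rcases (hemem x).mp hx with ⟨hxt, hxm⟩
            rcases (by simpa using hall x hxm : x = pvGetType p ∨ x ∈ l.map pvGetType) with h | h
            · exact absurd h hxt
            · exact h
          rw [ih (n + 1) _ _ needed h1 h2 h3 h4 h5 h6]
          have hM : pvM (ms.map (fun x => (PySem.List.index? ((p :: l).map pvGetType) x).getD 0))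
              = pvM ((ms.erase (pvGetType p)).map (fun x => (PySem.List.index? (l.map pvGetType) x).getD 0)) + 1 := by
            apply pvM_erase ms (pvGetType p) _ _ hmnd htm ⟨w, hw, hwt⟩
            intro x hx
            by_cases hxt : x = pvGetType p
            · subst hxt
              rw [List.map_cons, PySem.List.index?_cons_self]
              simp
            · rw [List.map_cons, PySem.List.index?_cons_of_ne _ (fun h => hxt h.symm)]
              have hxl : x ∈ l.map pvGetType := h6 x ((hemem x).mpr ⟨hxt, hx⟩)
              have hsome := (PySem.List.index?_isSome_iff (xs := l.map pvGetType) (v := x)).mpr hxl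
              cases hk : PySem.List.index? (l.map pvGetType) x with
              | none => rw [hk] at hsome; simp at hsome
              | some k => simp [hxt]
          rw [hM]
          push_cast
          omega
      · -- head type not needed: skip
        have htn : PySem.Set.contains needed (pvGetType p) = false := by
          rw [Bool.eq_false_iff]
          intro h
          rcases (hmem _).mp ((PySem.Set.contains_iff _ _).mp h) with h' | h'
          · exact hts h'
          · exact htm h'
        simp only [pvScan, htn, Bool.false_eq_true, if_false]
        have hxt : ∀ x ∈ ms, x ≠ pvGetType p := fun x hx hxe => htm (hxe ▸ hx)
        have hall' : ∀ x ∈ ms, x ∈ l.map pvGetType := by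
          intro x hx
          rcases (by simpa using hall x hx : x = pvGetType p ∨ x ∈ l.map pvGetType) with h | h
          · exact absurd h (hxt x hx)
          · exact h
        rw [ih (n + 1) seen ms needed hsnd hmnd hne hdisj hmem hall']
        have hmapeq : ms.map (fun x => (PySem.List.index? ((p :: l).map pvGetType) x).getD 0)
            = ms.map (fun x => ((PySem.List.index? (l.map pvGetType) x).getD 0) + 1) := by
          apply List.map_congr_left
          intro x hx
          rw [List.map_cons, PySem.List.index?_cons_of_ne _ (fun h => hxt x hx h.symm)]
          have hsome := (PySem.List.index?_isSome_iff (xs := l.map pvGetType) (v := x)).mpr (hall' x hx)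
          cases hk : PySem.List.index? (l.map pvGetType) x with
          | none => rw [hk] at hsome; simp at hsome
          | some k => simp
        rw [hmapeq, pvM_shift ms _ hne]
        push_cast; ring

-- ===== VERDICT (by name: the statement is the Claim_ definition above) =====
theorem find_index_for_aug_spec : Claim_equal_find_index_for_aug := by
  intro pipeline _ _
  unfold Spec_find_index_for_aug find_index_for_aug find_index_for_aug_alt
  set types := pipeline.map pvGetType with hty
  set needed := PySem.Set.ofList (types.filter (fun t => decide (t ∈ pvLoadOps))) with hnd
  have hmemn : ∀ x, x ∈ needed ↔ x ∈ types ∧ x ∈ pvLoadOps := by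
    intro x
    rw [hnd, PySem.Set.mem_ofList, List.mem_filter]
    simp
  by_cases h1 : "LoadImageFromFile" ∈ types <;> by_cases h2 : "LoadAnnotations" ∈ types
  all_goals simp only [h1, h2, if_true, if_false]
  · -- both present: ms = [LIFF, LA]
    have hne : needed ≠ [] := by
      intro h
      have := (hmemn "LoadImageFromFile").mpr ⟨h1, by simp [pvLoadOps]⟩
      rw [h] at this; cases this
    rw [if_neg hne]
    rw [pvScan_spec pipeline 0 PySem.Set.empty ["LoadImageFromFile", "LoadAnnotations"] needed
      (by simp [PySem.Set.empty]) (by simp) (by simp)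
      (by simp [PySem.Set.empty])
      (by intro x
          rw [hmemn x]
          constructor
          · rintro ⟨hx, hop⟩
            exact Or.inr (by simpa [pvLoadOps] using hop)
          · rintro (h | h)
            · simp [PySem.Set.empty] at h
            · rcases (by simpa using h : x = "LoadImageFromFile" ∨ x = "LoadAnnotations") with rfl | rfl
              · exact ⟨h1, by simp [pvLoadOps]⟩
              · exact ⟨h2, by simp [pvLoadOps]⟩)
      (by intro x hx
          rcases (by simpa using hx : x = "LoadImageFromFile" ∨ x = "LoadAnnotations") with h | h
          · exact h ▸ h1
          · exact h ▸ h2)]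
    have hs1 := (PySem.List.index?_isSome_iff (xs := types) (v := _)).mpr h1
    have hs2 := (PySem.List.index?_isSome_iff (xs := types) (v := _)).mpr h2
    cases hk1 : PySem.List.index? types "LoadImageFromFile" with
    | none => rw [hk1] at hs1; simp at hs1
    | some k1 =>
      cases hk2 : PySem.List.index? types "LoadAnnotations" with
      | none => rw [hk2] at hs2; simp at hs2
      | some k2 =>
        simp only [pvM, List.map_cons, List.map_nil, List.foldr_cons, List.foldr_nil,
          hk1, hk2, Option.getD_some, ← hty]
        have : ((max (k1 : Int) k2) ≠ -1) := by
          have : (0:Int) ≤ max (k1 : Int) k2 := le_max_of_le_left (by positivity)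
          omega
        rw [if_pos this]
        push_cast
        omega
  · -- only LoadImageFromFile
    have hne : needed ≠ [] := by
      intro h
      have := (hmemn "LoadImageFromFile").mpr ⟨h1, by simp [pvLoadOps]⟩
      rw [h] at this; cases this
    rw [if_neg hne]
    rw [pvScan_spec pipeline 0 PySem.Set.empty ["LoadImageFromFile"] needed
      (by simp [PySem.Set.empty]) (by simp) (by simp)
      (by simp [PySem.Set.empty])
      (by intro x
          rw [hmemn x]
          constructor
          · rintro ⟨hx, hop⟩
            rcases (by simpa [pvLoadOps] using hop : x = "LoadImageFromFile" ∨ x = "LoadAnnotations") with rfl | rfl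
            · exact Or.inr (by simp)
            · exact absurd hx h2
          · rintro (h | h)
            · simp [PySem.Set.empty] at h
            · rw [(by simpa using h : x = "LoadImageFromFile")]
              exact ⟨h1, by simp [pvLoadOps]⟩)
      (by intro x hx; rw [(by simpa using hx : x = "LoadImageFromFile")]; exact h1)]
    have hs1 := (PySem.List.index?_isSome_iff (xs := types) (v := _)).mpr h1
    cases hk1 : PySem.List.index? types "LoadImageFromFile" with
    | none => rw [hk1] at hs1; simp at hs1
    | some k1 =>
      simp only [pvM, List.map_cons, List.map_nil, List.foldr_cons, List.foldr_nil,
        hk1, Option.getD_some, ← hty]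
      have hmax : max ((k1 : Nat) : Int) (-1) = (k1 : Int) := by
        apply max_eq_left; omega
      rw [hmax, if_pos (by omega : ((k1 : Nat) : Int) ≠ -1)]
      push_cast
      omega
  · -- only LoadAnnotations
    have hne : needed ≠ [] := by
      intro h
      have := (hmemn "LoadAnnotations").mpr ⟨h2, by simp [pvLoadOps]⟩
      rw [h] at this; cases this
    rw [if_neg hne]
    rw [pvScan_spec pipeline 0 PySem.Set.empty ["LoadAnnotations"] needed
      (by simp [PySem.Set.empty]) (by simp) (by simp)
      (by simp [PySem.Set.empty])
      (by intro x
          rw [hmemn x]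
          constructor
          · rintro ⟨hx, hop⟩
            rcases (by simpa [pvLoadOps] using hop : x = "LoadImageFromFile" ∨ x = "LoadAnnotations") with rfl | rfl
            · exact absurd hx h1
            · exact Or.inr (by simp)
          · rintro (h | h)
            · simp [PySem.Set.empty] at h
            · rw [(by simpa using h : x = "LoadAnnotations")]
              exact ⟨h2, by simp [pvLoadOps]⟩)
      (by intro x hx; rw [(by simpa using hx : x = "LoadAnnotations")]; exact h2)]
    have hs2 := (PySem.List.index?_isSome_iff (xs := types) (v := _)).mpr h2
    cases hk2 : PySem.List.index? types "LoadAnnotations" with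
    | none => rw [hk2] at hs2; simp at hs2
    | some k2 =>
      simp only [pvM, List.map_cons, List.map_nil, List.foldr_cons, List.foldr_nil,
        hk2, Option.getD_some, ← hty]
      have hmax : max (-1 : Int) ((k2 : Nat) : Int) = (k2 : Int) := by
        apply max_eq_right; omega
      rw [hmax, if_pos (by omega : ((k2 : Nat) : Int) ≠ -1)]
      push_cast
      omega
  · -- neither present
    have hnil : needed = [] := by
      rw [List.eq_nil_iff_forall_not_mem]
      intro x hx
      rcases (hmemn x).mp hx with ⟨hxt, hxo⟩
      rcases (by simpa [pvLoadOps] using hxo : x = "LoadImageFromFile" ∨ x = "LoadAnnotations") with h | h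
      · exact h1 (h ▸ hxt)
      · exact h2 (h ▸ hxt)
    rw [if_pos hnil]
    norm_num
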